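-- pv_equiv track=rewrite | github.com/josephsenior/Grinta-Agent | backend/execution/file_operations.py | _extract_truncation_lines
-- ===== SOURCE A (Python) =====
-- def _extract_truncation_lines(
--     lines: list[str], head_budget: int, tail_budget: int
-- ) -> tuple[list[str], list[str]]:
--     """Extract head and tail lines within fixed budgets."""
--     head_lines: list[str] = []
--     head_chars = 0
--     for line in lines:
--         if head_chars + len(line) > head_budget:
--             break
--         head_lines.append(line)
--         head_chars += len(line)
--
--     tail_lines: list[str] = []
--     tail_chars = 0
--     for line in reversed(lines):
--         if tail_chars + len(line) > tail_budget:
--             break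
--         tail_lines.insert(0, line)
--         tail_chars += len(line)
--
--     return head_lines, tail_lines
-- ===== SOURCE B (Python) =====
-- def _bisect_le(xs, x):
--     """Largest count of leading elements of the sorted list xs that are <= x."""
--     lo, hi = 0, len(xs)
--     while lo < hi:
--         mid = (lo + hi) // 2
--         if xs[mid] <= x:
--             lo = mid + 1
--         else:
--             hi = mid
--     return lo
--
--
-- def _extract_truncation_lines(
--     lines: list[str], head_budget: int, tail_budget: int
-- ) -> tuple[list[str], list[str]]:
--     """Extract head and tail lines within fixed budgets."""
--     lens = [len(line) for line in lines]
--     pre = []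
--     s = 0
--     for L in lens:
--         s += L
--         pre.append(s)
--     suf = []
--     s = 0
--     for L in reversed(lens):
--         s += L
--         suf.append(s)
--     h = _bisect_le(pre, head_budget)
--     t = _bisect_le(suf, tail_budget)
--     return lines[:h], lines[len(lines) - t:]
-- ===== Notes on version B (the rewrite author's own statement) =====
-- stated objective: faster
-- what changed: Replaced the two per-line budget loops (tail built by quadratic insert(0,...)) by cumulative-sum tables plus a binary search for the cutoff counts, returning slices lines[:h] and lines[len(lines)-t:].
import Mathlib
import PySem

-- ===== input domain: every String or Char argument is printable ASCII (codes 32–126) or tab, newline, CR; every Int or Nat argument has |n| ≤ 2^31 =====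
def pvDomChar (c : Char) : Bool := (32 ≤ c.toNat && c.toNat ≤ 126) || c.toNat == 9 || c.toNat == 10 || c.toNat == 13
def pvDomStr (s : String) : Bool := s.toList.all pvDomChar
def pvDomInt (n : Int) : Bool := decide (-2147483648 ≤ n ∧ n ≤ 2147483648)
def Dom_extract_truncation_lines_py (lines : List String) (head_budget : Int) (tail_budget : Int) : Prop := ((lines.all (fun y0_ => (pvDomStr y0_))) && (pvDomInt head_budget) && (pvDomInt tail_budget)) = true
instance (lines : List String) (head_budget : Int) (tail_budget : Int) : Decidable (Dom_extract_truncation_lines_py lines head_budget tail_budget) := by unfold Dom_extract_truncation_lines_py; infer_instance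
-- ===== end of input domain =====

-- B replaces the per-line budget loops by cumulative-sum tables plus a binary search
-- for the cutoff counts (alternative decomposition; tail comes out as a single drop).

-- ===== PORT A =====
-- 'for line in lines: if head_chars+len(line)>head_budget: break; append; add'
def pvHeadLoop (head_budget : Int) : List String → List String → Int → List String
  | [], head_lines, _ => head_lines
  | line :: rest, head_lines, head_chars =>
    if head_chars + PySem.Str.len line > head_budget then head_lines
    else pvHeadLoop head_budget rest (head_lines ++ [line]) (head_chars + PySem.Str.len line)

-- 'for line in reversed(lines): if tail_chars+len(line)>tail_budget: break; insert(0,line); add'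
def pvTailLoop (tail_budget : Int) : List String → List String → Int → List String
  | [], tail_lines, _ => tail_lines
  | line :: rest, tail_lines, tail_chars =>
    if tail_chars + PySem.Str.len line > tail_budget then tail_lines
    else pvTailLoop tail_budget rest (line :: tail_lines) (tail_chars + PySem.Str.len line)

def extract_truncation_lines_py (lines : List String) (head_budget : Int) (tail_budget : Int) : List String × List String :=
  (pvHeadLoop head_budget lines [] 0, pvTailLoop tail_budget lines.reverse [] 0)

-- ===== PORT B =====
-- Source B's _bisect_le: while lo < hi: mid=(lo+hi)//2; …  (lo, hi, mid are nonnegative, so Nat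
-- arithmetic and Nat division coincide with Python's here)
def pvBisectLE (xs : List Int) (x : Int) (lo hi : Nat) : Nat :=
  if h : lo < hi then
    let mid := (lo + hi) / 2
    if xs.getD mid 0 ≤ x then pvBisectLE xs x (mid + 1) hi
    else pvBisectLE xs x lo mid
  else lo
termination_by hi - lo
decreasing_by all_goals omega

-- Source B's cumulative-sum loop: s += L; out.append(s)
def pvCumSums (lens : List Int) : List Int :=
  (lens.foldl (fun (acc : List Int × Int) L => (acc.1 ++ [acc.2 + L], acc.2 + L)) ([], 0)).1

-- lines[:h] and lines[len(lines)-t:] with h, t nonnegative and t ≤ len(lines): exact as take/drop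
def extract_truncation_lines_py_alt (lines : List String) (head_budget : Int) (tail_budget : Int) : List String × List String :=
  let lens := lines.map PySem.Str.len
  let pre := pvCumSums lens
  let suf := pvCumSums lens.reverse
  let h := pvBisectLE pre head_budget 0 pre.length
  let t := pvBisectLE suf tail_budget 0 suf.length
  (lines.take h, lines.drop (lines.length - t))

-- ===== PRECONDITION & SPEC =====
def Spec_extract_truncation_lines_py (lines : List String) (head_budget : Int) (tail_budget : Int) (out : List String × List String) : Prop := out = extract_truncation_lines_py_alt lines head_budget tail_budget
instance (lines : List String) (head_budget : Int) (tail_budget : Int) (out : List String × List String) : Decidable (Spec_extract_truncation_lines_py lines head_budget tail_budget out) := by unfold Spec_extract_truncation_lines_py; infer_instance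

-- ===== CLAIM (what is proved, stated in full; the proofs are below) =====
def Claim_equal_extract_truncation_lines_py : Prop := ∀ (lines : List String) (head_budget : Int) (tail_budget : Int), Dom_extract_truncation_lines_py lines head_budget tail_budget → Spec_extract_truncation_lines_py lines head_budget tail_budget (extract_truncation_lines_py lines head_budget tail_budget)

-- ===== LEMMAS AND PROOFS =====

/-- Clean form of the cumulative sums of `lens` starting from running total `s`. -/
def pvCums : List Int → Int → List Int
  | [], _ => []
  | L :: rest, s => (s + L) :: pvCums rest (s + L)

/-- Clean form of A's head selection: longest prefix whose running char count stays ≤ b. -/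
def pvHeadSel (b : Int) : List String → Int → List String
  | [], _ => []
  | line :: rest, c =>
    if c + PySem.Str.len line > b then []
    else line :: pvHeadSel b rest (c + PySem.Str.len line)

theorem pvCumSums_foldl (lens : List Int) : ∀ (acc : List Int) (s : Int),
    (lens.foldl (fun (acc : List Int × Int) L => (acc.1 ++ [acc.2 + L], acc.2 + L)) (acc, s)).1
      = acc ++ pvCums lens s := by
  induction lens with
  | nil => intro acc s; simp [pvCums]
  | cons L rest ih => intro acc s; simp [List.foldl, pvCums, ih]

theorem pvCumSums_eq (lens : List Int) : pvCumSums lens = pvCums lens 0 := by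
  simpa using pvCumSums_foldl lens [] 0

theorem pvCums_mono (lens : List Int) (s : Int) (h0 : ∀ L ∈ lens, 0 ≤ L) :
    ∀ y ∈ pvCums lens s, s ≤ y := by
  induction lens generalizing s with
  | nil => simp [pvCums]
  | cons L rest ih =>
    intro y hy
    simp only [pvCums, List.mem_cons] at hy
    have hL : 0 ≤ L := h0 L (by simp)
    rcases hy with rfl | hy
    · omega
    · have := ih (s + L) (fun L' hL' => h0 L' (by simp [hL'])) y hy
      omega

theorem pvCums_sorted (lens : List Int) (s : Int) (h0 : ∀ L ∈ lens, 0 ≤ L) :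
    List.Pairwise (· ≤ ·) (pvCums lens s) := by
  induction lens generalizing s with
  | nil => simp [pvCums]
  | cons L rest ih =>
    simp only [pvCums, List.pairwise_cons]
    refine ⟨fun y hy => pvCums_mono rest (s + L) (fun L' hL' => h0 L' (by simp [hL'])) y hy,
      ih (s + L) (fun L' hL' => h0 L' (by simp [hL']))⟩

theorem pvLen_nonneg (s : String) : 0 ≤ PySem.Str.len s := by
  simp [PySem.Str.len_eq]

/-- A's head loop with accumulator = accumulator ++ clean selection. -/
theorem pvHeadLoop_eq (b : Int) (ls : List String) : ∀ (acc : List String) (c : Int),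
    pvHeadLoop b ls acc c = acc ++ pvHeadSel b ls c := by
  induction ls with
  | nil => intro acc c; simp [pvHeadLoop, pvHeadSel]
  | cons line rest ih =>
    intro acc c
    simp only [pvHeadLoop, pvHeadSel]
    split
    · simp
    · simp [ih]

/-- A's tail loop prepends, so it produces the reverse of the clean selection. -/
theorem pvTailLoop_eq (b : Int) (ls : List String) : ∀ (acc : List String) (c : Int),
    pvTailLoop b ls acc c = (pvHeadSel b ls c).reverse ++ acc := by
  induction ls with
  | nil => intro acc c; simp [pvTailLoop, pvHeadSel]
  | cons line rest ih =>
    intro acc c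
    simp only [pvTailLoop, pvHeadSel]
    split
    · simp
    · simp [ih]

/-- The clean selection takes exactly as many lines as cumulative sums fit in the budget. -/
theorem pvHeadSel_eq_take (b : Int) (ls : List String) : ∀ (c : Int),
    pvHeadSel b ls c = ls.take ((pvCums (ls.map PySem.Str.len) c).countP (fun s => decide (s ≤ b))) := by
  induction ls with
  | nil => intro c; simp [pvHeadSel, pvCums]
  | cons line rest ih =>
    intro c
    simp only [pvHeadSel, List.map_cons, pvCums]
    split
    · rename_i hgt
      have hz : (pvCums (rest.map PySem.Str.len) (c + PySem.Str.len line)).countP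
          (fun s => decide (s ≤ b)) = 0 := by
        rw [List.countP_eq_zero]
        intro y hy
        have := pvCums_mono (rest.map PySem.Str.len) (c + PySem.Str.len line)
          (by intro L hL; simp only [List.mem_map] at hL; obtain ⟨s, _, rfl⟩ := hL; exact pvLen_nonneg s) y hy
        simp only [decide_eq_true_eq]
        omega
      rw [List.countP_cons, hz]
      simp only [decide_eq_true_eq]
      rw [if_neg (by omega)]
      simp
    · rename_i hle
      rw [List.countP_cons]
      simp only [decide_eq_true_eq]
      rw [if_pos (by omega)]
      simp [ih]

/-- Binary-search invariant: the result r keeps all indices < r within budget and all ≥ r over. -/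
theorem pvBisectLE_spec (xs : List Int) (x : Int)
    (hsort : ∀ i j, i ≤ j → j < xs.length → xs.getD i 0 ≤ xs.getD j 0) :
    ∀ k lo hi, hi - lo = k → lo ≤ hi → hi ≤ xs.length →
    (∀ i, i < lo → xs.getD i 0 ≤ x) → (∀ i, hi ≤ i → i < xs.length → x < xs.getD i 0) →
    pvBisectLE xs x lo hi ≤ xs.length ∧
    (∀ i, i < pvBisectLE xs x lo hi → xs.getD i 0 ≤ x) ∧
    (∀ i, pvBisectLE xs x lo hi ≤ i → i < xs.length → x < xs.getD i 0) := by
  intro k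
  induction k using Nat.strong_induction_on with
  | _ k ih =>
    intro lo hi hk hlh hlen hlow hhigh
    rw [pvBisectLE]
    by_cases h : lo < hi
    · rw [dif_pos h]
      simp only
      set mid := (lo + hi) / 2 with hmid
      have hmlo : lo ≤ mid := by omega
      have hmhi : mid < hi := by omega
      by_cases hc : xs.getD mid 0 ≤ x
      · rw [if_pos hc]
        exact ih (hi - (mid + 1)) (by omega) (mid + 1) hi (by omega) (by omega) hlen
          (fun i hi' => by
            by_cases hil : i < lo
            · exact hlow i hil
            · exact le_trans (hsort i mid (by omega) (by omega)) hc)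
          hhigh
      · rw [if_neg hc]
        exact ih (mid - lo) (by omega) lo mid (by omega) (by omega) (by omega) hlow
          (fun i hi' hil => lt_of_lt_of_le (by omega) (hsort mid i hi' (by omega)))
    · rw [dif_neg h]
      have : lo = hi := by omega
      subst this
      exact ⟨by omega, hlow, hhigh⟩

/-- A count determined by a cut index. -/
theorem pvCountP_of_cut (x : Int) : ∀ (xs : List Int) (r : Nat), r ≤ xs.length →
    (∀ i, i < r → xs.getD i 0 ≤ x) → (∀ i, r ≤ i → i < xs.length → x < xs.getD i 0) →
    xs.countP (fun s => decide (s ≤ x)) = r := by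
  intro xs
  induction xs with
  | nil => intro r hr _ _; simp at hr ⊢; omega
  | cons a rest ih =>
    intro r hr hlow hhigh
    rw [List.countP_cons]
    match r with
    | 0 =>
      have ha : x < a := by simpa using hhigh 0 (by omega) (by simp)
      simp only [decide_eq_true_eq]
      rw [if_neg (by omega)]
      rw [ih 0 (by omega) (by omega)
        (fun i _ hi' => by simpa using hhigh (i + 1) (by omega) (by simpa using hi'))]
    | r' + 1 =>
      have ha : a ≤ x := by simpa using hlow 0 (by omega)
      simp only [decide_eq_true_eq]
      rw [if_pos ha]
      rw [ih r' (by simpa using hr)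
        (fun i hi' => by simpa using hlow (i + 1) (by omega))
        (fun i hi' hl => by simpa using hhigh (i + 1) (by omega) (by simpa using hl))]

/-- Pairwise sortedness in getD-index form. -/
theorem pvSorted_getD (xs : List Int) (hs : List.Pairwise (· ≤ ·) xs) :
    ∀ i j, i ≤ j → j < xs.length → xs.getD i 0 ≤ xs.getD j 0 := by
  intro i j hij hj
  rcases Nat.eq_or_lt_of_le hij with rfl | hlt
  · exact le_refl _
  · rw [List.getD_eq_getElem _ _ (by omega), List.getD_eq_getElem _ _ hj]
    exact List.pairwise_iff_getElem.mp hs i j (by omega) hj hlt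

/-- The binary search over cumulative sums of string lengths computes the countP cut. -/
theorem pvBisect_eq_countP (ls : List String) (b : Int) :
    pvBisectLE (pvCumSums (ls.map PySem.Str.len)) b 0 (pvCumSums (ls.map PySem.Str.len)).length
      = (pvCums (ls.map PySem.Str.len) 0).countP (fun s => decide (s ≤ b)) := by
  rw [pvCumSums_eq]
  have h0 : ∀ L ∈ ls.map PySem.Str.len, (0:Int) ≤ L := by
    intro L hL; simp only [List.mem_map] at hL; obtain ⟨s, _, rfl⟩ := hL; exact pvLen_nonneg s
  have hsort := pvSorted_getD _ (pvCums_sorted (ls.map PySem.Str.len) 0 h0)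
  obtain ⟨hle, hlow, hhigh⟩ := pvBisectLE_spec (pvCums (ls.map PySem.Str.len) 0) b hsort
    ((pvCums (ls.map PySem.Str.len) 0).length) 0 ((pvCums (ls.map PySem.Str.len) 0).length)
    (by omega) (by omega) (le_refl _) (by omega) (by omega)
  exact (pvCountP_of_cut b _ _ hle hlow hhigh).symm

-- ===== VERDICT (by name: the statement is the Claim_ definition above) =====
theorem extract_truncation_lines_py_spec : Claim_equal_extract_truncation_lines_py := by
  intro lines head_budget tail_budget _
  unfold Spec_extract_truncation_lines_py extract_truncation_lines_py extract_truncation_lines_py_alt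
  simp only [Prod.mk.injEq]
  refine ⟨?_, ?_⟩
  · -- head side
    rw [pvHeadLoop_eq, pvHeadSel_eq_take]
    simp [pvBisect_eq_countP]
  · -- tail side
    rw [pvTailLoop_eq, pvHeadSel_eq_take]
    simp only [← List.map_reverse]
    rw [pvBisect_eq_countP lines.reverse tail_budget]
    rw [List.take_reverse]
    simp
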